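-- pv_equiv track=rewrite | github.com/valentinsoare/WithPython | relearningPy/translate_english_into_pigLatin.py | processing_word
-- ===== SOURCE A (Python) =====
-- def processing_word(given_word):
--     list_with_punctuation_location = []
--     punctuation_chars = '!"#$%&\'()*+,./:;<=>?[\]`{|}~'
--     word_after_punctuation = given_word.translate(str.maketrans('', '', punctuation_chars))
--
--     for i in range(len(given_word)):
--         if given_word[i] in punctuation_chars and (0 <= i <= 2 or (len(given_word) - 3) <= i <= (len(given_word) - 1)):
--             list_with_punctuation_location.append((given_word[i], i))
--
--     return list(word_after_punctuation), list_with_punctuation_location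
-- ===== SOURCE B (Python) =====
-- def processing_word(given_word):
--     punctuation_chars = '!"#$%&\'()*+,./:;<=>?[\]`{|}~'
--     n = len(given_word)
--     letters = []
--     locs = []
--     for i in range(n - 1, -1, -1):
--         c = given_word[i]
--         if c in punctuation_chars:
--             if i <= 2 or n - 3 <= i:
--                 locs.append((c, i))
--         else:
--             letters.append(c)
--     letters.reverse()
--     locs.reverse()
--     return letters, locs
-- ===== Notes on version B (the rewrite author's own statement) =====
-- stated objective: alternative
-- what changed: B replaces A's staged design (a translate() pass for the letters plus a separate forward index scan for the punctuation locations) with one fused backward loop over the indices that classifies each character once, pushing into two accumulators built back-to-front and reversed at the end.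
import Mathlib
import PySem

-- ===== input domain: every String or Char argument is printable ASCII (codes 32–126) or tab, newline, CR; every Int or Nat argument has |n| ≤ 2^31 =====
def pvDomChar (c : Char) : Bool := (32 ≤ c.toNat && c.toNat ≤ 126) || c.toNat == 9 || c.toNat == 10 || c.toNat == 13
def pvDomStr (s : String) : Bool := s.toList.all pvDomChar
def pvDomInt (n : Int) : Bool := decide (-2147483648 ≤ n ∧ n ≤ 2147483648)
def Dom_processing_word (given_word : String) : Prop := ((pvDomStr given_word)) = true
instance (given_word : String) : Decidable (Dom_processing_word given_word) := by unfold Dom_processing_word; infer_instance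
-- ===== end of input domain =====

-- B is an alternative decomposition: one fused backward pass with two accumulators (built
-- back-to-front, then reversed) instead of A's staged translate() pass plus forward index scan.

-- the punctuation set both Pythons hard-code (the '\]' in the source is backslash + ']')
def pvPunct : List Char := "!\"#$%&'()*+,./:;<=>?[\\]`{|}~".toList

-- ===== PORT A =====
-- `given_word[i]` is read with getD; i < len always holds in the loop, so this is exact.
def processing_word (given_word : String) : List String × (List (String × Int)) :=
  let cs := given_word.toList
  let n := cs.length
  -- word.translate(str.maketrans('', '', punctuation_chars)) : delete punctuation chars
  let word_after_punctuation := String.ofList (cs.filter (fun c => ¬ pvPunct.contains c))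
  -- for i in range(len(given_word)): if given_word[i] in punct and (i ≤ 2 or len-3 ≤ i): append
  let locs := (List.range n).foldl (fun acc i =>
      if pvPunct.contains (cs.getD i ' ') &&
         (decide ((i : Int) ≤ 2) || decide ((n : Int) - 3 ≤ (i : Int))) then
        acc ++ [(String.ofList [cs.getD i ' '], (i : Int))]
      else acc) []
  (word_after_punctuation.toList.map (fun c => String.ofList [c]), locs)

-- ===== PORT B =====
-- for i in range(n-1, -1, -1): … ; both lists are built in reverse order and reversed at the end.
def processing_word_alt (given_word : String) : List String × (List (String × Int)) :=
  let cs := given_word.toList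
  let n := cs.length
  let p := ((List.range n).reverse).foldl
      (fun (acc : List String × List (String × Int)) i =>
        let c := cs.getD i ' '
        if pvPunct.contains c then
          if decide ((i : Int) ≤ 2) || decide ((n : Int) - 3 ≤ (i : Int)) then
            (acc.1, acc.2 ++ [(String.ofList [c], (i : Int))])
          else acc
        else (acc.1 ++ [String.ofList [c]], acc.2)) ([], [])
  (p.1.reverse, p.2.reverse)

-- ===== PRECONDITION & SPEC =====
def Spec_processing_word (given_word : String) (out : List String × (List (String × Int))) : Prop := out = processing_word_alt given_word
instance (given_word : String) (out : List String × (List (String × Int))) : Decidable (Spec_processing_word given_word out) := by unfold Spec_processing_word; infer_instance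

-- ===== CLAIM =====
def Claim_equal_processing_word : Prop := ∀ (given_word : String), Dom_processing_word given_word → Spec_processing_word given_word (processing_word given_word)

-- ===== LEMMAS AND PROOFS =====

-- B's fused two-accumulator fold splits into the two independent filter/map passes
theorem pairFold (punct bound : ℕ → Bool) (g : ℕ → String) (f : ℕ → String × Int) :
    ∀ (xs : List ℕ) (a : List String) (b : List (String × Int)),
      xs.foldl (fun acc i =>
          if punct i then
            if bound i then (acc.1, acc.2 ++ [f i]) else acc
          else (acc.1 ++ [g i], acc.2)) (a, b)
        = (a ++ (xs.filter (fun i => !punct i)).map g,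
           b ++ (xs.filter (fun i => punct i && bound i)).map f) := by
  intro xs
  induction xs with
  | nil => intro a b; simp
  | cons x xs ih =>
      intro a b
      simp only [List.foldl_cons, List.filter_cons]
      by_cases hp : punct x = true
      · by_cases hb : bound x = true
        · simp [hp, hb, ih]
        · simp [hp, hb, ih]
      · simp [hp, ih]

-- an index-wise filter/map over range(len cs) equals the direct filter/map over cs
theorem filter_map_range_getD (p : Char → Bool) (h : Char → String) (d : Char) :
    ∀ (cs : List Char),
      ((List.range cs.length).filter (fun i => p (cs.getD i d))).map
          (fun i => h (cs.getD i d)) = (cs.filter p).map h := by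
  intro cs
  induction cs with
  | nil => simp
  | cons c rest ih =>
      simp only [List.length_cons, List.range_succ_eq_map, List.filter_cons,
        List.getD_cons_zero, List.filter_map]
      simp only [List.getD_eq_getElem?_getD] at ih
      by_cases hp : p c = true <;>
        simp [hp, List.map_map, Function.comp_def, ih]

-- ===== VERDICT =====
theorem processing_word_spec : Claim_equal_processing_word := by
  intro w _
  unfold Spec_processing_word processing_word processing_word_alt
  simp only
  rw [pairFold]
  refine Prod.ext ?_ ?_
  · simp only [List.nil_append, List.filter_reverse, List.map_reverse, List.reverse_reverse]
    rw [filter_map_range_getD (fun c => !pvPunct.contains c) (fun c => String.ofList [c]) ' ']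
    simp
  · rw [PySem.List.foldl_append_if]
    simp [List.filter_reverse, List.map_reverse]
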